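-- pv_equiv track=rewrite | github.com/IgnacioLCastillo/IntroduccionProgramacion | 2023/20231011_C1_ArreglosCompleto.py | maximoValoresImpares
-- ===== SOURCE A (Python) =====
-- def maximoValoresImpares(pArreglo,pTam):
--     primerImpar=0 #bandera
--     mimaximo=None
--     posicMaxima = None
--     for i in range (0,pTam,1):
--         if pArreglo[i]%2!=0:
--             if primerImpar==0:
--                 mimaximo=pArreglo[i]
--                 posicMaxima=i
--                 primerImpar=1
--             else:
--                 if pArreglo[i]>mimaximo:
--                     mimaximo=pArreglo[i]
--                     posicMaxima = i
--
--     return mimaximo,posicMaxima,primerImpar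
-- ===== SOURCE B (Python) =====
-- def maximoValoresImpares(pArreglo, pTam):
--     # Phase 1: collect the odd values (with their positions) from the first pTam slots.
--     impares = [(pArreglo[i], i) for i in range(pTam) if pArreglo[i] % 2 != 0]
--     if not impares:
--         return None, None, 0
--     # Phase 2: the maximum odd value.
--     mimaximo = max(v for v, _ in impares)
--     # Phase 3: the first position holding that maximum.
--     for v, i in impares:
--         if v == mimaximo:
--             return mimaximo, i, 1
-- ===== Notes on version B (the rewrite author's own statement) =====
-- stated objective: alternative
-- what changed: Replaced the single stateful flag/running-max scan by a three-phase decomposition: collect the odd (value, position) pairs, take max of the values, then locate the first pair holding that maximum.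
import Mathlib
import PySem

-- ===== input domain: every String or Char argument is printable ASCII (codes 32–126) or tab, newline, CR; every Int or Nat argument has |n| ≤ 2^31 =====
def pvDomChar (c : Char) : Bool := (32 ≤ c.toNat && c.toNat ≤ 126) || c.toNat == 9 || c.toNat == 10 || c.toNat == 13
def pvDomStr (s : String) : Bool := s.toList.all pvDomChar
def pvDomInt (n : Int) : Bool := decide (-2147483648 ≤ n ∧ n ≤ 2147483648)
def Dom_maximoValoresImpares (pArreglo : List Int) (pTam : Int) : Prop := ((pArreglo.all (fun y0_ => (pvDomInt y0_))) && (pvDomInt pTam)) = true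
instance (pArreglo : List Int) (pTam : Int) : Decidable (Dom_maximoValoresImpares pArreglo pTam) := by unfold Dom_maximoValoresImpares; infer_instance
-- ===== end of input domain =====

-- B: same result via a three-phase decomposition (collect odd (value,position) pairs, max of values, first position of that max) instead of A's flag/running-max scan; same cost.

-- ===== PORT A =====
-- state (primerImpar, mimaximo, posicMaxima); pArreglo[i] → pyGetD … 0 (in range under Pre_);
-- 'pArreglo[i] > mimaximo' reads mimaximo via .getD 0 — mimaximo is 'some' whenever that branch runs (primerImpar ≠ 0)
def maximoValoresImpares (pArreglo : List Int) (pTam : Int) : Option Int × Option Int × Int :=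
  let s := (PySem.List.pyRange 0 pTam 1).foldl
    (fun (st : Int × Option Int × Option Int) i =>
      let v := PySem.List.pyGetD pArreglo i 0
      if v % 2 != 0 then
        if st.1 == 0 then (1, some v, some i)
        else if v > st.2.1.getD 0 then (1, some v, some i) else st
      else st)
    (0, none, none)
  (s.2.1, s.2.2, s.1)

-- ===== PORT B =====
def maximoValoresImpares_alt (pArreglo : List Int) (pTam : Int) : Option Int × Option Int × Int :=
  let impares := (PySem.List.pyRange 0 pTam 1).filterMap (fun i =>
    let v := PySem.List.pyGetD pArreglo i 0
    if v % 2 != 0 then some (v, i) else none)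
  if impares.isEmpty then (none, none, 0)
  else
    match PySem.List.max? (impares.map Prod.fst) (fun v => v) with
    | none => (none, none, 0)  -- unreachable: impares is nonempty
    | some mimaximo =>
      match impares.find? (fun q => q.1 == mimaximo) with
      | some (_, i) => (some mimaximo, some i, 1)
      | none => (some mimaximo, none, 1)  -- unreachable: mimaximo occurs in impares

-- ===== PRECONDITION & SPEC =====
-- Pre_ excludes exactly the inputs where Python A raises IndexError (some index in range(pTam) out of bounds, i.e. pTam > len(pArreglo))
def Pre_maximoValoresImpares (pArreglo : List Int) (pTam : Int) : Prop := pTam ≤ (pArreglo.length : Int)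
instance (pArreglo : List Int) (pTam : Int) : Decidable (Pre_maximoValoresImpares pArreglo pTam) := by unfold Pre_maximoValoresImpares; infer_instance
def pvWitness_maximoValoresImpares : List Int × Int := ([2, 7, 4, 3], 4)

def Spec_maximoValoresImpares (pArreglo : List Int) (pTam : Int) (out : Option Int × Option Int × Int) : Prop := out = maximoValoresImpares_alt pArreglo pTam
instance (pArreglo : List Int) (pTam : Int) (out : Option Int × Option Int × Int) : Decidable (Spec_maximoValoresImpares pArreglo pTam out) := by unfold Spec_maximoValoresImpares; infer_instance

-- ===== CLAIM (what is proved, stated in full; the proofs are below) =====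
def Claim_equal_maximoValoresImpares : Prop := ∀ (pArreglo : List Int) (pTam : Int), Dom_maximoValoresImpares pArreglo pTam → Pre_maximoValoresImpares pArreglo pTam → Spec_maximoValoresImpares pArreglo pTam (maximoValoresImpares pArreglo pTam)

-- ===== LEMMAS AND PROOFS =====

-- 'best of a pair list': the (max value, first position of the max), as a left fold
def bestStep (acc : Option (Int × Int)) (x : Int × Int) : Option (Int × Int) :=
  match acc with
  | none => some x
  | some (m, p) => if x.1 > m then some x else some (m, p)

def encode (acc : Option (Int × Int)) : Int × Option Int × Option Int :=
  match acc with
  | none => (0, none, none)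
  | some (m, p) => (1, some m, some p)

def oddPair (arr : List Int) (i : Int) : Option (Int × Int) :=
  let v := PySem.List.pyGetD arr i 0
  if v % 2 != 0 then some (v, i) else none

lemma foldA_eq_best (arr : List Int) (l : List Int) (acc : Option (Int × Int)) :
    l.foldl
      (fun (st : Int × Option Int × Option Int) i =>
        let v := PySem.List.pyGetD arr i 0
        if v % 2 != 0 then
          if st.1 == 0 then (1, some v, some i)
          else if v > st.2.1.getD 0 then (1, some v, some i) else st
        else st)
      (encode acc)
    = encode ((l.filterMap (oddPair arr)).foldl bestStep acc) := by
  induction l generalizing acc with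
  | nil => rfl
  | cons i t ih =>
    rw [List.foldl_cons]
    by_cases hodd : ((PySem.List.pyGetD arr i 0) % 2 != 0) = true
    · have hfil : oddPair arr i = some (PySem.List.pyGetD arr i 0, i) := by
        simp [oddPair, hodd]
      simp only [List.filterMap_cons, hfil, List.foldl_cons]
      rw [← ih (bestStep acc (PySem.List.pyGetD arr i 0, i))]
      congr 1
      cases acc with
      | none => simp [encode, bestStep, hodd]
      | some mp =>
        obtain ⟨m, p⟩ := mp
        simp only [encode, bestStep, hodd, if_pos]
        split_ifs with h1 h2 h2 <;> simp_all
    · have hfil : oddPair arr i = none := by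
        simp only [oddPair]; simp at hodd; simp [hodd]
      simp only [List.filterMap_cons, hfil]
      rw [← ih acc]
      congr 1
      simp at hodd; simp [hodd]

lemma best_some_of_some (t : List (Int × Int)) (x : Int × Int) :
    ∃ y, t.foldl bestStep (some x) = some y := by
  induction t generalizing x with
  | nil => exact ⟨x, rfl⟩
  | cons a t ih =>
    simp only [List.foldl_cons, bestStep]
    split_ifs <;> exact ih _

lemma best_eq_none_iff (P : List (Int × Int)) :
    P.foldl bestStep none = none ↔ P = [] := by
  cases P with
  | nil => simp
  | cons a t =>
    simp only [List.foldl_cons, bestStep]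
    obtain ⟨y, hy⟩ := best_some_of_some t a
    simp [hy]

lemma best_spec (P : List (Int × Int)) (m p : Int)
    (h : P.foldl bestStep none = some (m, p)) :
    PySem.List.max? (P.map Prod.fst) (fun v => v) = some m ∧
    P.find? (fun q => q.1 == m) = some (m, p) := by
  induction P using List.reverseRecOn generalizing m p with
  | nil => simp at h
  | append_singleton P x ih =>
    rw [List.foldl_append] at h
    rcases hP : P.foldl bestStep none with _ | mp
    · -- P = []
      have hPe : P = [] := (best_eq_none_iff P).mp hP
      subst hPe
      obtain ⟨v, i⟩ := x
      obtain ⟨rfl, rfl⟩ : v = m ∧ i = p := by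
        have h' : (some (v, i) : Option (Int × Int)) = some (m, p) := h
        simpa using h'
      refine ⟨?_, by simp⟩
      simpa using PySem.List.max?_id_cons (x := v) (t := ([] : List Int))
    · obtain ⟨m₀, p₀⟩ := mp
      obtain ⟨hmax₀, hfind₀⟩ := ih m₀ p₀ hP
      have hPne : P ≠ [] := by
        rintro rfl; simp at hP
      obtain ⟨q, rest, rfl⟩ : ∃ q rest, P = q :: rest := by
        cases P with
        | nil => exact absurd rfl hPne
        | cons q rest => exact ⟨q, rest, rfl⟩
      -- running-max form of max? over the appended list
      have hm₀ : (rest.map Prod.fst).foldl max q.1 = m₀ := by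
        have := PySem.List.max?_id_cons (x := q.1) (t := rest.map Prod.fst)
        rw [List.map_cons, this] at hmax₀
        exact Option.some_injective _ hmax₀
      have hmaxapp :
          PySem.List.max? (((q :: rest) ++ [x]).map Prod.fst) (fun v => v)
            = some (max m₀ x.1) := by
        have hrw := PySem.List.max?_id_cons (x := q.1) (t := rest.map Prod.fst ++ [x.1])
        simp only [List.map_append, List.map_cons, List.map_nil, List.cons_append]
        rw [hrw, List.foldl_append]
        simp [hm₀]
      rw [hP] at h
      rw [List.foldl_cons, List.foldl_nil,
        show bestStep (some (m₀, p₀)) x = if x.1 > m₀ then some x else some (m₀, p₀) from rfl] at h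
      by_cases hgt : x.1 > m₀
      · rw [if_pos hgt] at h
        obtain ⟨rfl, rfl⟩ : x = (m, p) := by cases x; simpa using h
        constructor
        · rw [hmaxapp]; congr 1; omega
        · have hnone : (q :: rest).find? (fun q' => q'.1 == m) = none := by
            rw [List.find?_eq_none]
            intro y hy
            have : y.1 ≤ m₀ := by
              have := PySem.List.max?_isMax hmax₀ y.1 (List.mem_map_of_mem hy)
              simpa using this
            simp only [beq_iff_eq]
            omega
          rw [List.find?_append, hnone]
          simp
      · rw [if_neg hgt] at h
        obtain ⟨rfl, rfl⟩ : (m₀, p₀) = (m, p) := by simpa using h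
        constructor
        · rw [hmaxapp]; congr 1; omega
        · rw [List.find?_append, hfind₀]; rfl

-- ===== VERDICT (by name: the statement is the Claim_ definition above) =====
theorem maximoValoresImpares_spec : Claim_equal_maximoValoresImpares := by
  intro pArreglo pTam _ _
  unfold Spec_maximoValoresImpares maximoValoresImpares maximoValoresImpares_alt
  have hA := foldA_eq_best pArreglo (PySem.List.pyRange 0 pTam 1) none
  have hfm : (PySem.List.pyRange 0 pTam 1).filterMap
      (fun i => let v := PySem.List.pyGetD pArreglo i 0
                if v % 2 != 0 then some (v, i) else none)
      = (PySem.List.pyRange 0 pTam 1).filterMap (oddPair pArreglo) := rfl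
  simp only [hfm] at *
  set P := (PySem.List.pyRange 0 pTam 1).filterMap (oddPair pArreglo) with hPdef
  simp only [encode] at hA
  rw [hA]
  rcases hbest : P.foldl bestStep none with _ | mp
  · have hPe : P = [] := (best_eq_none_iff P).mp hbest
    simp [hPe]
  · obtain ⟨m, p⟩ := mp
    obtain ⟨hmax, hfind⟩ := best_spec P m p hbest
    have hPne : P ≠ [] := by intro hPe; rw [hPe] at hbest; simp at hbest
    simp [hmax, hfind, List.isEmpty_iff, hPne]
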